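-- pv_equiv track=rewrite | github.com/we-comBoo/algorithm | 0321minji/[week01]/1758.py | solve
-- ===== SOURCE A (Python) =====
-- def solve(n,num):
--     num.sort(reverse=True)
--     result=0
--     for i in range(n):
--         if num[i]-i<=0:
--             return result
--         result+=num[i]-i
--     return result
-- ===== SOURCE B (Python) =====
-- def solve(n, num):
--     num.sort(reverse=True)
--     # num[i] - i is strictly decreasing, so binary-search the first index
--     # lo in [0, n) with num[lo] - lo <= 0; the answer is then the closed form
--     # sum(num[:lo]) - lo*(lo-1)//2.
--     lo, hi = 0, n
--     while lo < hi:
--         mid = (lo + hi) // 2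
--         if num[mid] > mid:
--             lo = mid + 1
--         else:
--             hi = mid
--     return sum(num[:lo]) - lo * (lo - 1) // 2
-- ===== Notes on version B (the rewrite author's own statement) =====
-- stated objective: alternative
-- what changed: Replaces A's linear accumulation loop by a binary search for the cutoff index (num[i]-i is strictly decreasing after the descending sort) plus the arithmetic-series closed form sum(num[:k]) - k*(k-1)//2.
-- outside the precondition, e.g. on solve(3, [0]): A returns 0, B raises IndexError
import Mathlib
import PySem

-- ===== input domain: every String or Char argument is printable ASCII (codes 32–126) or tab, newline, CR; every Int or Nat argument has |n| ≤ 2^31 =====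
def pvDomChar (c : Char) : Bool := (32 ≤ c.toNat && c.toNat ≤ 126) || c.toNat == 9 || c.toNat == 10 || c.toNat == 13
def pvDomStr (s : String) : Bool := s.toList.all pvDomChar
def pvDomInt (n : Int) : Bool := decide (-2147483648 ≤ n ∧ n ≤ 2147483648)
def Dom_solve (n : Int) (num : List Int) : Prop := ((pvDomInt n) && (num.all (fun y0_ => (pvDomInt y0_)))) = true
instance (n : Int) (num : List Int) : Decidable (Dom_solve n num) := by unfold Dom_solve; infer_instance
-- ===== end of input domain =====

-- B replaces A's accumulation loop by a binary search for the cutoff index plus the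
-- arithmetic-series closed form; both Pythons sort `num` in place (same mutation), the
-- equivalence proved here is about the return value.

-- ===== PORT A =====
-- the 'for i in range(n)' loop with early return; acc is 'result', i counts up like
-- Python's lazy range (the Nat fuel, enough iterations by construction, only makes the
-- recursion structural; the loop stops early exactly where Python returns or raises)
def solveLoopA (s : List Int) (n : Int) : Nat → Int → Int → Int
  | 0, _, acc => acc
  | f + 1, i, acc =>
    if i < n then
      match PySem.List.pyGet? s i with
      | none => acc   -- IndexError in Python; excluded by Pre_solve
      | some v => if v - i ≤ 0 then acc else solveLoopA s n f (i + 1) (acc + (v - i))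
    else acc

def solve (n : Int) (num : List Int) : Int :=
  solveLoopA (PySem.List.sorted num (fun x => x) true) n n.toNat 0 0

-- ===== PORT B =====
-- the 'while lo < hi' binary search of Source B; the Nat fuel (enough iterations by
-- construction) only makes the recursion structural, it never changes the result
def bsearchBFuel (s : List Int) : Nat → Int → Int → Int
  | 0, lo, _ => lo
  | f + 1, lo, hi =>
    if lo < hi then
      let mid := PySem.Int.floordiv (lo + hi) 2
      match PySem.List.pyGet? s mid with
      | none => lo   -- IndexError in Python; unreachable under Pre_solve
      | some v => if v > mid then bsearchBFuel s f (mid + 1) hi else bsearchBFuel s f lo mid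
    else lo

def bsearchB (s : List Int) (lo hi : Int) : Int := bsearchBFuel s (hi - lo).toNat lo hi

def solve_alt (n : Int) (num : List Int) : Int :=
  let s := PySem.List.sorted num (fun x => x) true
  let lo := bsearchB s 0 n
  (PySem.List.slice s none (some lo)).sum - PySem.Int.floordiv (lo * (lo - 1)) 2

-- ===== PRECONDITION & SPEC =====
-- Pre_ restricts to the problem's natural domain n ≤ len(num) (the original task feeds
-- n = len(num)); for n > len(num) A raises IndexError unless its early exit fires first,
-- and B's binary search raises IndexError there.
def Pre_solve (n : Int) (num : List Int) : Prop := n ≤ (num.length : Int)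
instance (n : Int) (num : List Int) : Decidable (Pre_solve n num) := by unfold Pre_solve; infer_instance
def pvWitness_solve : Int × List Int := (3, [5, 1, 4])

def Spec_solve (n : Int) (num : List Int) (out : Int) : Prop := out = solve_alt n num
instance (n : Int) (num : List Int) (out : Int) : Decidable (Spec_solve n num out) := by unfold Spec_solve; infer_instance

-- ===== CLAIM (what is proved, stated in full; the proofs are below) =====
def Claim_equal_solve : Prop := ∀ (n : Int) (num : List Int), Dom_solve n num → Pre_solve n num → Spec_solve n num (solve n num)

-- ===== LEMMAS AND PROOFS =====

-- the cutoff predicate: position k (0 ≤ k) still contributes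
def cutP (s : List Int) (k : Int) : Prop := k < s.getD k.toNat 0

-- s is nonincreasing ⇒ cutP is downward closed (on indices below the length)
lemma cutP_mono (s : List Int)
    (hmono : ∀ p q : Nat, p ≤ q → q < s.length → s.getD q 0 ≤ s.getD p 0)
    {p q : Int} (hp : 0 ≤ p) (hpq : p ≤ q) (hq : q < (s.length : Int))
    (h : cutP s q) : cutP s p := by
  unfold cutP at *
  have hm := hmono p.toNat q.toNat (by omega) (by omega)
  omega

lemma not_cutP_mono (s : List Int)
    (hmono : ∀ p q : Nat, p ≤ q → q < s.length → s.getD q 0 ≤ s.getD p 0)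
    {p q : Int} (hp : 0 ≤ p) (hpq : p ≤ q) (hq : q < (s.length : Int))
    (h : ¬ cutP s p) : ¬ cutP s q := by
  intro hc; exact h (cutP_mono s hmono hp hpq hq hc)

-- binary-search invariant: bsearchB returns the cutoff r
lemma bsearchBFuel_spec (s : List Int)
    (hmono : ∀ p q : Nat, p ≤ q → q < s.length → s.getD q 0 ≤ s.getD p 0)
    (n : Int) (hn : n ≤ (s.length : Int)) :
    ∀ (f : Nat) (lo hi : Int), (hi - lo).toNat ≤ f → 0 ≤ lo → lo ≤ hi → hi ≤ n →
      (∀ k : Int, 0 ≤ k → k < lo → cutP s k) →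
      (∀ k : Int, hi ≤ k → k < n → ¬ cutP s k) →
      (0 ≤ bsearchBFuel s f lo hi ∧ bsearchBFuel s f lo hi ≤ n ∧
        (∀ k : Int, 0 ≤ k → k < bsearchBFuel s f lo hi → cutP s k) ∧
        (∀ k : Int, bsearchBFuel s f lo hi ≤ k → k < n → ¬ cutP s k)) := by
  intro f
  induction f with
  | zero =>
    intro lo hi hf hlo hlh hhn hlow hhigh
    have hlh' : lo = hi := by omega
    simp only [bsearchBFuel]
    exact ⟨hlo, by omega, hlow, fun k hk hkn => hhigh k (by omega) hkn⟩
  | succ f ih =>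
    intro lo hi hf hlo hlh hhn hlow hhigh
    by_cases h : lo < hi
    · have hb1 := PySem.Int.le_floordiv_iff_mul_le (a := lo + hi) (b := 2) (q := lo) (by omega)
      have hb2 := PySem.Int.floordiv_lt_iff_lt_mul (a := lo + hi) (b := 2) (q := hi) (by omega)
      set mid := PySem.Int.floordiv (lo + hi) 2 with hmiddef
      have hmidlo : lo ≤ mid := by rw [hmiddef]; omega
      have hmidhi : mid < hi := by rw [hmiddef]; omega
      have hmlen : mid < (s.length : Int) := by omega
      have hget : PySem.List.pyGet? s mid = some (s.getD mid.toNat 0) := by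
        rw [PySem.List.pyGet?_eq_some_getElem s (show (0:Int) ≤ mid by omega) hmlen,
          List.getD_eq_getElem _ _ (by omega)]
      simp only [bsearchBFuel, if_pos h, ← hmiddef, hget]
      by_cases hv : s.getD mid.toNat 0 > mid
      · have hcut : cutP s mid := by unfold cutP; omega
        rw [if_pos hv]
        exact ih (mid + 1) hi (by omega) (by omega) (by omega) hhn
          (fun k hk0 hk => by
            by_cases hkm : k < lo
            · exact hlow k hk0 hkm
            · exact cutP_mono s hmono hk0 (by omega) (by omega) hcut)
          hhigh
      · have hncut : ¬ cutP s mid := by unfold cutP; omega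
        rw [if_neg hv]
        exact ih lo mid (by omega) hlo (by omega) (by omega) hlow
          (fun k hmk hk => not_cutP_mono s hmono (by omega) hmk (by omega) hncut)
    · simp only [bsearchBFuel, if_neg h]
      exact ⟨hlo, by omega, hlow, fun k hk hkn => hhigh k (by omega) hkn⟩

lemma bsearchB_spec (s : List Int)
    (hmono : ∀ p q : Nat, p ≤ q → q < s.length → s.getD q 0 ≤ s.getD p 0)
    (n : Int) (hn : n ≤ (s.length : Int)) :
    ∀ lo hi : Int, 0 ≤ lo → lo ≤ hi → hi ≤ n →
      (∀ k : Int, 0 ≤ k → k < lo → cutP s k) →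
      (∀ k : Int, hi ≤ k → k < n → ¬ cutP s k) →
      (0 ≤ bsearchB s lo hi ∧ bsearchB s lo hi ≤ n ∧
        (∀ k : Int, 0 ≤ k → k < bsearchB s lo hi → cutP s k) ∧
        (∀ k : Int, bsearchB s lo hi ≤ k → k < n → ¬ cutP s k)) := by
  intro lo hi hlo hlh hhn hlow hhigh
  exact bsearchBFuel_spec s hmono n hn (hi - lo).toNat lo hi (le_refl _) hlo hlh hhn hlow hhigh

-- A's loop, run from index j up to n, sums s[k]-k over [j, r) when the cutoff is r
lemma solveLoopA_eq (s : List Int) (n r : Int) (hn : n ≤ (s.length : Int))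
    (hr0 : 0 ≤ r) (hrn : r ≤ n)
    (hcut : ∀ k : Int, 0 ≤ k → k < r → cutP s k)
    (hstop : r < n → ¬ cutP s r) :
    ∀ (f : Nat) (j acc : Int), (n - j).toNat ≤ f → 0 ≤ j → j ≤ r →
      solveLoopA s n f j acc
        = acc + ((PySem.List.pyRange j r 1).map (fun k => s.getD k.toNat 0 - k)).sum := by
  intro f
  induction f with
  | zero =>
    intro j acc hf hj0 hjr
    have hjn : n ≤ j := by omega
    rw [PySem.List.pyRange_one_eq_nil (by omega)]
    simp [solveLoopA]
  | succ m ih =>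
    intro j acc hf hj0 hjr
    by_cases hjn : j < n
    · have hjlen : j < (s.length : Int) := by omega
      have hget : PySem.List.pyGet? s j = some (s.getD j.toNat 0) := by
        rw [PySem.List.pyGet?_eq_some_getElem s hj0 hjlen]
        rw [List.getD_eq_getElem _ _ (by omega)]
      simp only [solveLoopA, if_pos hjn, hget]
      by_cases hjr2 : j < r
      · have hc : cutP s j := hcut j hj0 hjr2
        unfold cutP at hc
        rw [if_neg (by omega)]
        rw [ih (j + 1) _ (by omega) (by omega) (by omega)]
        rw [PySem.List.pyRange_one_cons hjr2]
        simp only [List.map_cons, List.sum_cons]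
        ring
      · have hjr3 : j = r := by omega
        have hnc : ¬ cutP s j := hjr3 ▸ hstop (by omega)
        unfold cutP at hnc
        rw [if_pos (by omega)]
        rw [hjr3, PySem.List.pyRange_one_eq_nil (by omega)]
        simp
    · have hjr3 : j = r := by omega
      simp only [solveLoopA, if_neg hjn]
      rw [hjr3, PySem.List.pyRange_one_eq_nil (by omega)]
      simp

-- B's closed form equals the same sum, for the cutoff r
lemma closed_form_eq (s : List Int) (r : Int) (hr0 : 0 ≤ r) (hrlen : r ≤ (s.length : Int)) :
    (PySem.List.slice s none (some r)).sum - PySem.Int.floordiv (r * (r - 1)) 2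
      = ((PySem.List.pyRange 0 r 1).map (fun k => s.getD k.toNat 0 - k)).sum := by
  rw [PySem.List.slice_to s hr0]
  generalize hm : r.toNat = m
  have hr : r = (m : Int) := by omega
  subst hr
  clear hm hr0
  induction m with
  | zero => simp [PySem.List.pyRange_one_eq_nil, PySem.Int.floordiv]
  | succ m ih =>
    have hmlen : m < s.length := by exact_mod_cast (by push_cast; omega : (m : Int) < (s.length : Int))
    have hpush : ((m : Int) + 1) = ((m + 1 : Nat) : Int) := by push_cast; ring
    have h1 : (s.take (m + 1)).sum = (s.take m).sum + s.getD m 0 := by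
      rw [List.getD_eq_getElem _ _ hmlen, List.sum_take_succ]
    have h2 : PySem.Int.floordiv (((m : Int) + 1) * ((m : Int) + 1 - 1)) 2
        = PySem.Int.floordiv ((m : Int) * ((m : Int) - 1)) 2 + m := by
      have e : ((m : Int) + 1) * ((m : Int) + 1 - 1) = (m : Int) * ((m : Int) - 1) + 2 * m := by
        ring
      rw [e, PySem.Int.floordiv_eq_ediv_of_pos (by omega),
        PySem.Int.floordiv_eq_ediv_of_pos (by omega)]
      generalize (m : Int) * ((m : Int) - 1) = x
      omega
    rw [h1, ← hpush, h2, PySem.List.pyRange_one_succ_right (by omega : (0:Int) ≤ (m:Int))]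
    simp only [List.map_append, List.map_cons, List.map_nil, List.sum_append, List.sum_cons,
      List.sum_nil, Int.toNat_natCast]
    rw [← ih (by push_cast at hrlen; omega)]
    ring

-- the sorted list is nonincreasing, in getD form
lemma sorted_nonincreasing (num : List Int) :
    ∀ p q : Nat, p ≤ q → q < (PySem.List.sorted num (fun x => x) true).length →
      (PySem.List.sorted num (fun x => x) true).getD q 0
        ≤ (PySem.List.sorted num (fun x => x) true).getD p 0 := by
  intro p q hpq hq
  have hpw := PySem.List.sorted_pairwise_rev (xs := num) (key := fun x => x)
  rw [List.pairwise_iff_getElem] at hpw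
  rw [List.getD_eq_getElem _ _ hq, List.getD_eq_getElem _ _ (by omega)]
  rcases Nat.eq_or_lt_of_le hpq with rfl | hlt
  · exact le_refl _
  · exact hpw p q (by omega) hq hlt

-- ===== VERDICT (by name: the statement is the Claim_ definition above) =====
theorem solve_spec : Claim_equal_solve := by
  intro n num _ hpre
  unfold Spec_solve
  simp only [solve]
  simp only [solve_alt]
  set s := PySem.List.sorted num (fun x => x) true with hs
  have hlen : s.length = num.length :=
    (PySem.List.sorted_perm (xs := num) (key := fun x => x) (rev := true)).length_eq
  have hn : n ≤ (s.length : Int) := by unfold Pre_solve at hpre; rw [hlen]; exact hpre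
  have hmono := sorted_nonincreasing num
  rw [← hs] at hmono
  by_cases hn0 : n ≤ 0
  · have hbs : bsearchB s 0 n = 0 := by
      rw [bsearchB, show (n - 0).toNat = 0 by omega]
      simp [bsearchBFuel]
    rw [hbs, show n.toNat = 0 by omega]
    simp [solveLoopA, PySem.List.slice_to s (le_refl 0), PySem.Int.floordiv]
  · have hspec := bsearchB_spec s hmono n hn 0 n (le_refl 0) (by omega) (le_refl n)
      (fun k hk0 hk => absurd hk (by omega)) (fun k hk hkn => absurd (lt_of_le_of_lt hk hkn) (lt_irrefl n))
    obtain ⟨hr0, hrn, hcut, hstop⟩ := hspec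
    set r := bsearchB s 0 n with hrdef
    rw [solveLoopA_eq s n r hn hr0 hrn hcut (fun h => hstop r (le_refl r) h) n.toNat 0 0 (by omega) (le_refl 0) hr0]
    rw [closed_form_eq s r hr0 (by omega)]
    ring
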